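-- pv_equiv track=rewrite | github.com/michaelg9/coding | python/arrays/is_permutation.py | is_permutation_map
-- ===== SOURCE A (Python) =====
-- def is_permutation_map(str1: str, str2: str):
--   counts = {}
--   for c in str1:
--     count = counts.get(c, 0) + 1
--     counts[c] = count
--   for c in str2:
--     count = counts.get(c, 0) - 1
--     if (count < 0):
--       return False
--     counts[c] = count
--   return True
-- ===== SOURCE B (Python) =====
-- def is_permutation_map(str1: str, str2: str):
--   s1 = sorted(str1)
--   s2 = sorted(str2)
--   i = 0
--   j = 0
--   while j < len(s2):
--     if i >= len(s1):
--       return False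
--     if s1[i] < s2[j]:
--       i += 1
--     elif s1[i] == s2[j]:
--       i += 1
--       j += 1
--     else:
--       return False
--   return True
-- ===== Notes on version B (the rewrite author's own statement) =====
-- stated objective: alternative
-- what changed: Replaces A's hash-count decrement pass (build a dict of str1's counts, decrement per char of str2, fail on negative) by sorting both strings and running a two-pointer merge scan that checks sorted(str2) is a subsequence of sorted(str1).
import Mathlib
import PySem

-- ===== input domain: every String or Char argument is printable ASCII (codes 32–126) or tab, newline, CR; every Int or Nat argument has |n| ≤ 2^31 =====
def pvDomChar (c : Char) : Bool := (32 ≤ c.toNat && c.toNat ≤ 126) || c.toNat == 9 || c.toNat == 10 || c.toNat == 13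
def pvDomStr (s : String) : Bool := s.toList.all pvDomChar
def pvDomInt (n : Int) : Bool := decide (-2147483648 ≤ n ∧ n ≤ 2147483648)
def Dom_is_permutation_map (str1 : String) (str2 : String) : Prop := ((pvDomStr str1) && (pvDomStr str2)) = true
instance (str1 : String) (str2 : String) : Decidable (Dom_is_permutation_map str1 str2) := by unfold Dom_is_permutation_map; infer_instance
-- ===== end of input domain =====

-- B sorts both strings and checks sorted(str2) is a subsequence of sorted(str1) by a
-- two-pointer merge scan, instead of A's hash-count decrement pass; alternative algorithm.

-- ===== PORT A =====
-- counts = {}; for c in str1: counts[c] = counts.get(c, 0) + 1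
def pvBuildCounts (s : List Char) : PySem.Dict Char Int :=
  s.foldl (fun d c => d.insert c (d.getD c 0 + 1)) PySem.Dict.empty

-- for c in str2: count = counts.get(c, 0) - 1; if count < 0: return False; counts[c] = count
def pvLoopA : List Char → PySem.Dict Char Int → Bool
  | [], _ => true
  | c :: rest, d =>
    let count := d.getD c 0 - 1
    if count < 0 then false
    else pvLoopA rest (d.insert c count)

def is_permutation_map (str1 : String) (str2 : String) : Bool :=
  pvLoopA str2.toList (pvBuildCounts str1.toList)

-- ===== PORT B =====
-- the while loop of Source B: two pointers over the two sorted lists, expressed as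
-- structural recursion on the unread suffixes (i/j advance = dropping a head)
def pvMergeScan : List Char → List Char → Bool
  | _, [] => true                                  -- j reached len(s2)
  | [], _ :: _ => false                            -- i >= len(s1)
  | a :: s1, b :: s2 =>
    if a < b then pvMergeScan s1 (b :: s2)         -- s1[i] < s2[j]: i += 1
    else if a = b then pvMergeScan s1 s2           -- equal: i += 1; j += 1
    else false

def is_permutation_map_alt (str1 : String) (str2 : String) : Bool :=
  pvMergeScan (PySem.List.sorted str1.toList (fun c => c) false)
              (PySem.List.sorted str2.toList (fun c => c) false)

-- ===== PRECONDITION & SPEC =====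
def Spec_is_permutation_map (str1 : String) (str2 : String) (out : Bool) : Prop := out = is_permutation_map_alt str1 str2
instance (str1 : String) (str2 : String) (out : Bool) : Decidable (Spec_is_permutation_map str1 str2 out) := by unfold Spec_is_permutation_map; infer_instance

-- ===== CLAIM (what is proved, stated in full; the proofs are below) =====
def Claim_equal_is_permutation_map : Prop := ∀ (str1 : String) (str2 : String), Dom_is_permutation_map str1 str2 → Spec_is_permutation_map str1 str2 (is_permutation_map str1 str2)

-- ===== LEMMAS AND PROOFS =====

theorem pvLoopA_iff (l : List Char) : ∀ d : PySem.Dict Char Int,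
    pvLoopA l d = true ↔ ∀ c ∈ l, (l.count c : Int) ≤ d.getD c 0 := by
  induction l with
  | nil => intro d; simp [pvLoopA]
  | cons c rest ih =>
    intro d
    simp only [pvLoopA]
    by_cases h : d.getD c 0 - 1 < 0
    · simp only [if_pos h]
      constructor
      · intro hfalse; cases hfalse
      · intro hall
        have h1 := hall c (List.mem_cons_self ..)
        have hc : (1 : Int) ≤ ((c :: rest).count c : Int) := by
          have : 1 ≤ (c :: rest).count c := by simp
          exact_mod_cast this
        omega
    · rw [if_neg h, ih]
      constructor
      · intro hall x hx
        by_cases hxc : x = c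
        · subst hxc
          have hcount : ((x :: rest).count x : Int) = (rest.count x : Int) + 1 := by simp
          by_cases hmem : x ∈ rest
          · have h2 := hall x hmem
            rw [PySem.Dict.getD_insert_self] at h2
            omega
          · have h0 : rest.count x = 0 := List.count_eq_zero.mpr hmem
            rw [hcount, h0]; push_cast; omega
        · have hcount : ((c :: rest).count x : Int) = (rest.count x : Int) := by
            rw [List.count_cons_of_ne (Ne.symm hxc)]
          rcases List.mem_cons.mp hx with heq | hxr
          · exact absurd heq hxc
          · have h2 := hall x hxr
            rw [PySem.Dict.getD_insert_of_ne d _ _ hxc] at h2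
            omega
      · intro hall x hx
        by_cases hxc : x = c
        · subst hxc
          have hgoal := hall x (List.mem_cons_self ..)
          have hcount : ((x :: rest).count x : Int) = (rest.count x : Int) + 1 := by simp
          rw [PySem.Dict.getD_insert_self]
          omega
        · have hcount : ((c :: rest).count x : Int) = (rest.count x : Int) := by
            rw [List.count_cons_of_ne (Ne.symm hxc)]
          have h2 := hall x (List.mem_cons_of_mem _ hx)
          rw [PySem.Dict.getD_insert_of_ne d _ _ hxc]
          omega

-- A's loop succeeds iff str2's multiset is included in str1's
theorem a_iff (str1 str2 : String) :
    is_permutation_map str1 str2 = true ↔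
      ∀ c ∈ str2.toList, str2.toList.count c ≤ str1.toList.count c := by
  unfold is_permutation_map pvBuildCounts
  rw [PySem.Dict.foldl_insert_getD_add_one_eq_counter, pvLoopA_iff]
  constructor
  · intro hall c hc
    have := hall c hc
    rw [PySem.Dict.getD_counter] at this
    exact_mod_cast this
  · intro hall c hc
    rw [PySem.Dict.getD_counter]
    exact_mod_cast hall c hc

-- the merge scan on a sorted first list decides the sublist relation
theorem pvMergeScan_iff : ∀ (s1 : List Char), s1.Pairwise (· ≤ ·) → ∀ (s2 : List Char),
    (pvMergeScan s1 s2 = true ↔ s2.Sublist s1) := by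
  intro s1
  induction s1 with
  | nil =>
    intro _ s2
    cases s2 with
    | nil => simp [pvMergeScan]
    | cons b s2 => simp [pvMergeScan]
  | cons a s1 ih =>
    intro hp s2
    have hp1 : s1.Pairwise (· ≤ ·) := hp.tail
    have ha : ∀ x ∈ s1, a ≤ x := fun x hx => (List.pairwise_cons.mp hp).1 x hx
    cases s2 with
    | nil => simp [pvMergeScan]
    | cons b s2 =>
      simp only [pvMergeScan]
      by_cases hlt : a < b
      · rw [if_pos hlt, ih hp1 (b :: s2)]
        constructor
        · intro h; exact h.cons a
        · intro h
          cases h with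
          | cons _ h' => exact h'
          | cons₂ _ _ => exact absurd rfl (ne_of_lt hlt)
      · rw [if_neg hlt]
        by_cases heq : a = b
        · rw [if_pos heq, ih hp1 s2]
          subst heq
          exact (List.cons_sublist_cons).symm
        · rw [if_neg heq]
          have hba : b < a := lt_of_le_of_ne (not_lt.mp hlt) (fun h => heq h.symm)
          constructor
          · intro hfalse; cases hfalse
          · intro h
            have hbmem : b ∈ a :: s1 := h.subset (List.mem_cons_self ..)
            rcases List.mem_cons.mp hbmem with rfl | hbs1
            · exact absurd rfl (ne_of_lt hba)
            · exact absurd (ha b hbs1) (not_le.mpr hba)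

-- B succeeds iff str2's multiset is included in str1's
theorem alt_iff (str1 str2 : String) :
    is_permutation_map_alt str1 str2 = true ↔
      ∀ c ∈ str2.toList, str2.toList.count c ≤ str1.toList.count c := by
  unfold is_permutation_map_alt
  have hs1 := PySem.List.sorted_pairwise str1.toList (fun c : Char => c)
  have hs2 := PySem.List.sorted_pairwise str2.toList (fun c : Char => c)
  have hp1 := PySem.List.sorted_perm str1.toList (fun c : Char => c) false
  have hp2 := PySem.List.sorted_perm str2.toList (fun c : Char => c) false
  rw [pvMergeScan_iff _ hs1]
  constructor
  · intro h c hc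
    have hsub : (PySem.List.sorted str2.toList (fun c : Char => c) false).Subperm (PySem.List.sorted str1.toList (fun c : Char => c) false) := h.subperm
    have := List.subperm_ext_iff.mp hsub c (by rw [PySem.List.mem_sorted]; exact hc)
    rwa [hp1.count_eq, hp2.count_eq] at this
  · intro h
    apply List.sublist_of_subperm_of_sortedLE _ hs2.sortedLE hs1.sortedLE
    rw [List.subperm_ext_iff]
    intro c hc
    rw [hp1.count_eq, hp2.count_eq]
    exact h c (by rwa [PySem.List.mem_sorted] at hc)

-- ===== VERDICT (by name: the statement is the Claim_ definition above) =====
theorem is_permutation_map_spec : Claim_equal_is_permutation_map := by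
  intro str1 str2 _
  unfold Spec_is_permutation_map
  rw [Bool.eq_iff_iff, a_iff, alt_iff]
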